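-- pv_equiv track=rewrite | github.com/InternLM/InternEvo | internlm/core/parallel/shard.py | _partition_uniform
-- ===== SOURCE A (Python) =====
-- def _partition_uniform(num_items: int, pipeline_parallel_size: int, num_chunks: int):
--     assert (
--         num_items % num_chunks == 0
--     ), "Layer length should be divided by the number of chunks, otherwise parameter method is recomended"
--
--     parts = [[] for _ in range(pipeline_parallel_size)]
--     partition_items = num_items // num_chunks
--     for idx in range(num_chunks):
--         base_idx = idx * partition_items
--         chunk_size = partition_items // pipeline_parallel_size
--         left = pipeline_parallel_size - partition_items % pipeline_parallel_size
--         if chunk_size == 0: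
--             raise ValueError("Some nodes in Pipeline have no requests")
--
--         for p in range(pipeline_parallel_size):
--             st = base_idx
--             base_idx += chunk_size + (p >= left)
--             parts[p].append((st, base_idx))
--
--     indexes = []
--     for _parts in parts:
--         for s, e in _parts:
--             indexes.extend(list(range(s, e)))
--     assert len(indexes) == len(set(indexes)), indexes  # should have no duplicates
--     assert set(indexes) == set(list(range(num_items))), (indexes, num_items)  # should have the same indexes as expected
--     return parts
-- ===== SOURCE B (Python) =====
-- def _partition_uniform(num_items: int, pipeline_parallel_size: int, num_chunks: int):
--     assert (
--         num_items % num_chunks == 0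
--     ), "Layer length should be divided by the number of chunks, otherwise parameter method is recomended"
--
--     partition_items = num_items // num_chunks
--     chunk_size = partition_items // pipeline_parallel_size
--     left = pipeline_parallel_size - partition_items % pipeline_parallel_size
--     if chunk_size == 0:
--         raise ValueError("Some nodes in Pipeline have no requests")
--
--     return [
--         [
--             (
--                 idx * partition_items + p * chunk_size + max(0, p - left),
--                 idx * partition_items + (p + 1) * chunk_size + max(0, p + 1 - left),
--             )
--             for idx in range(num_chunks)
--         ]
--         for p in range(pipeline_parallel_size)
--     ]
-- ===== Notes on version B (the rewrite author's own statement) =====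
-- stated objective: simpler
-- what changed: Replaces A's mutating base_idx accumulator over nested loops and its O(num_items) index-rebuilding verification pass with a single nested comprehension that computes each part's (start, end) boundaries in closed form (idx*partition_items + p*chunk_size + max(0, p-left)).
-- outside the precondition, e.g. on _partition_uniform(0, 3, -1): A returns [[], [], []], B raises ValueError; on _partition_uniform(-10, 0, -2): A returns [], B raises ZeroDivisionError
import Mathlib
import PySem

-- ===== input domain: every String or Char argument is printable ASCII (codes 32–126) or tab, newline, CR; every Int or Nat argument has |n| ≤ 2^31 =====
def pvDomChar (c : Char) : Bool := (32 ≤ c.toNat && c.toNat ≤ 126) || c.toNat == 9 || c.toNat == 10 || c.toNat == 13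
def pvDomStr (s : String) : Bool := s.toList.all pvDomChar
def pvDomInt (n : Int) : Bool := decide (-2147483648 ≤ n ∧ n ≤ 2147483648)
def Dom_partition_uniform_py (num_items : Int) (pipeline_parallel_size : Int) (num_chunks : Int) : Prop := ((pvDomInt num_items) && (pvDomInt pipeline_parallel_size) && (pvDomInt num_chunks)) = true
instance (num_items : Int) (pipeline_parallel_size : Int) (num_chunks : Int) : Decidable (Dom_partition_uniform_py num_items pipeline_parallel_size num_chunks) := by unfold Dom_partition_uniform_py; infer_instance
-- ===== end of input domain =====

-- B replaces A's mutating base_idx accumulator and index-rebuilding verification pass by a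
-- closed-form nested comprehension for each part's (start, end) boundaries (objective: simpler).

-- ===== PORT A =====
-- `assert num_items % num_chunks == 0`, `raise ValueError` when chunk_size == 0 and the two final
-- verification asserts are raising control flow only: inputs where any of them fires are outside
-- Pre_partition_uniform_py, and where they pass they do not change the returned value.
def partition_uniform_py (num_items : Int) (pipeline_parallel_size : Int) (num_chunks : Int) : List (List (Int × Int)) :=
  let parts : List (List (Int × Int)) :=
    (PySem.List.pyRange 0 pipeline_parallel_size 1).map (fun _ => ([] : List (Int × Int)))
  let partition_items := PySem.Int.floordiv num_items num_chunks
  let parts := (PySem.List.pyRange 0 num_chunks 1).foldl (fun parts idx =>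
    let base_idx := idx * partition_items
    let chunk_size := PySem.Int.floordiv partition_items pipeline_parallel_size
    let left := pipeline_parallel_size - PySem.Int.mod partition_items pipeline_parallel_size
    ((PySem.List.pyRange 0 pipeline_parallel_size 1).foldl (fun st p =>
        let st0 := st.1
        let base' := st.1 + chunk_size + (if left ≤ p then (1 : Int) else 0)
        (base', PySem.List.pySetD st.2 p (PySem.List.pyGetD st.2 p [] ++ [(st0, base')])))
      (base_idx, parts)).2) parts
  parts

-- ===== PORT B =====
def partition_uniform_py_alt (num_items : Int) (pipeline_parallel_size : Int) (num_chunks : Int) : List (List (Int × Int)) :=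
  let partition_items := PySem.Int.floordiv num_items num_chunks
  let chunk_size := PySem.Int.floordiv partition_items pipeline_parallel_size
  let left := pipeline_parallel_size - PySem.Int.mod partition_items pipeline_parallel_size
  (PySem.List.pyRange 0 pipeline_parallel_size 1).map (fun p =>
    (PySem.List.pyRange 0 num_chunks 1).map (fun idx =>
      (idx * partition_items + p * chunk_size + max 0 (p - left),
       idx * partition_items + (p + 1) * chunk_size + max 0 (p + 1 - left))))

-- ===== PRECONDITION & SPEC =====
-- Pre_ excludes every input where A raises (assert failure, ZeroDivisionError, the chunk_size == 0
-- ValueError) and, with them, the degenerate inputs with non-positive num_chunks or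
-- pipeline_parallel_size on which A only returns because its loops (and so its eager chunk_size
-- check) are skipped entirely, while B's up-front chunk_size check raises there.
def Pre_partition_uniform_py (num_items : Int) (pipeline_parallel_size : Int) (num_chunks : Int) : Prop :=
  num_chunks ≠ 0 ∧ pipeline_parallel_size ≠ 0 ∧ num_chunks ∣ num_items ∧
    PySem.Int.floordiv (PySem.Int.floordiv num_items num_chunks) pipeline_parallel_size ≠ 0 ∧
    ((1 ≤ pipeline_parallel_size ∧ 1 ≤ num_chunks ∧ pipeline_parallel_size * num_chunks ≤ num_items) ∨
      num_items ≤ 0)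
instance (num_items : Int) (pipeline_parallel_size : Int) (num_chunks : Int) : Decidable (Pre_partition_uniform_py num_items pipeline_parallel_size num_chunks) := by unfold Pre_partition_uniform_py; infer_instance
def pvWitness_partition_uniform_py : Int × Int × Int := (8, 2, 2)

def Spec_partition_uniform_py (num_items : Int) (pipeline_parallel_size : Int) (num_chunks : Int) (out : List (List (Int × Int))) : Prop := out = partition_uniform_py_alt num_items pipeline_parallel_size num_chunks
instance (num_items : Int) (pipeline_parallel_size : Int) (num_chunks : Int) (out : List (List (Int × Int))) : Decidable (Spec_partition_uniform_py num_items pipeline_parallel_size num_chunks out) := by unfold Spec_partition_uniform_py; infer_instance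

-- ===== CLAIM (what is proved, stated in full; the proofs are below) =====
def Claim_equal_partition_uniform_py : Prop := ∀ (num_items : Int) (pipeline_parallel_size : Int) (num_chunks : Int), Dom_partition_uniform_py num_items pipeline_parallel_size num_chunks → Pre_partition_uniform_py num_items pipeline_parallel_size num_chunks → Spec_partition_uniform_py num_items pipeline_parallel_size num_chunks (partition_uniform_py num_items pipeline_parallel_size num_chunks)

-- ===== LEMMAS AND PROOFS =====

-- the closed-form boundary of part p after k inner steps of A's accumulator, base b
def pvF (b cs left k : Int) : Int := b + k * cs + max 0 (k - left)

theorem pvF_step (b cs left p : Int) :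
    pvF b cs left p + cs + (if left ≤ p then (1 : Int) else 0) = pvF b cs left (p + 1) := by
  have h1 : (p + 1) * cs = p * cs + cs := by ring
  unfold pvF
  rw [h1]
  generalize p * cs = q
  rcases le_or_gt left p with h | h
  · rw [if_pos h, max_eq_right (by omega), max_eq_right (by omega)]; omega
  · rw [if_neg (by omega), max_eq_left (by omega), max_eq_left (by omega)]; omega

-- A's inner loop (over p) appends (pvF b k, pvF b (k+1)) to every row k ≥ a
theorem pv_inner (cs left b P : Int) :
    ∀ (n : Nat) (a : Int), 0 ≤ a → (P - a).toNat = n →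
    ∀ (ps : List (List (Int × Int))), ps.length = P.toNat →
    ((PySem.List.pyRange a P 1).foldl (fun st p =>
        (st.1 + cs + (if left ≤ p then (1 : Int) else 0),
         PySem.List.pySetD st.2 p
           (PySem.List.pyGetD st.2 p [] ++
             [(st.1, st.1 + cs + (if left ≤ p then (1 : Int) else 0))])))
      (pvF b cs left a, ps)).2
    = ps.mapIdx (fun k row =>
        if a ≤ (k : Int) then row ++ [(pvF b cs left k, pvF b cs left (k + 1))] else row) := by
  intro n
  induction n with
  | zero =>
    intro a ha h0 ps hlen
    rw [PySem.List.pyRange_one_eq_nil (by omega)]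
    simp only [List.foldl_nil]
    refine (List.ext_getElem (by simp) ?_).symm
    intro k h1 h2
    simp only [List.getElem_mapIdx]
    rw [if_neg (by omega)]
  | succ n ih =>
    intro a ha h0 ps hlen
    have haP : a < P := by omega
    rw [PySem.List.pyRange_one_cons haP]
    simp only [List.foldl_cons]
    have hset : PySem.List.pySetD ps a
        (PySem.List.pyGetD ps a [] ++ [(pvF b cs left a, pvF b cs left a + cs + (if left ≤ a then (1:Int) else 0))])
        = ps.set a.toNat (ps[a.toNat]'(by omega) ++ [(pvF b cs left a, pvF b cs left (a+1))]) := by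
      rw [PySem.List.pySetD_of_nonneg ps _ ha,
        PySem.List.pyGetD_eq_getElem ps [] ha (by omega), pvF_step]
    rw [hset, pvF_step]
    rw [ih (a + 1) (by omega) (by omega) _ (by simpa using hlen)]
    refine List.ext_getElem (by simp) ?_
    intro k h1 h2
    simp only [List.getElem_mapIdx, List.getElem_set]
    by_cases hk : a.toNat = k
    · subst hk
      have hcast : ((a.toNat : Nat) : Int) = a := Int.toNat_of_nonneg ha
      rw [hcast, if_neg (by omega), if_pos rfl, if_pos le_rfl]
    · simp only [if_neg hk]
      by_cases hak : a + 1 ≤ (k : Int)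
      · rw [if_pos hak, if_pos (by omega)]
      · rw [if_neg hak, if_neg (by omega)]

-- A's whole double loop in closed form
theorem pv_outer (pi cs left P : Int) (hleft : 0 ≤ left) :
    ∀ (m : Nat),
    ((PySem.List.pyRange 0 (m : Int) 1).foldl (fun parts idx =>
        ((PySem.List.pyRange 0 P 1).foldl (fun st p =>
            (st.1 + cs + (if left ≤ p then (1 : Int) else 0),
             PySem.List.pySetD st.2 p
               (PySem.List.pyGetD st.2 p [] ++
                 [(st.1, st.1 + cs + (if left ≤ p then (1 : Int) else 0))])))
          (idx * pi, parts)).2)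
      ((PySem.List.pyRange 0 P 1).map (fun _ => ([] : List (Int × Int)))))
    = (List.range P.toNat).map (fun (p : Nat) =>
        (List.range m).map (fun (i : Nat) =>
          ((i : Int) * pi + (p : Int) * cs + max 0 ((p : Int) - left),
           (i : Int) * pi + ((p : Int) + 1) * cs + max 0 ((p : Int) + 1 - left)))) := by
  intro m
  induction m with
  | zero =>
    rw [show ((0 : Nat) : Int) = 0 from rfl, PySem.List.pyRange_one_eq_nil le_rfl]
    simp [PySem.List.pyRange_one, Function.comp_def, List.map_const']
  | succ m ih =>
    rw [show ((m + 1 : Nat) : Int) = (m : Int) + 1 by push_cast; ring,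
      PySem.List.pyRange_one_succ_right (by positivity), List.foldl_append]
    simp only [List.foldl_cons, List.foldl_nil]
    rw [ih]
    have hbase : (m : Int) * pi = pvF ((m : Int) * pi) cs left 0 := by
      unfold pvF; rw [max_eq_left (by omega)]; ring
    rw [hbase, pv_inner cs left ((m : Int) * pi) P (P - 0).toNat 0 le_rfl rfl _ (by simp)]
    refine List.ext_getElem (by simp) ?_
    intro k h1 h2
    simp only [List.getElem_mapIdx, List.getElem_map, List.getElem_range, List.range_succ,
      List.map_append, List.map_cons, List.map_nil]
    rw [if_pos (by positivity)]
    simp [pvF]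

theorem pv_A_closed (num_items P c : Int) (hP : 1 ≤ P) (hc : 0 ≤ c) :
    partition_uniform_py num_items P c
    = (List.range P.toNat).map (fun (p : Nat) =>
        (List.range c.toNat).map (fun (i : Nat) =>
          let pi := PySem.Int.floordiv num_items c
          let cs := PySem.Int.floordiv pi P
          let left := P - PySem.Int.mod pi P
          ((i : Int) * pi + (p : Int) * cs + max 0 ((p : Int) - left),
           (i : Int) * pi + ((p : Int) + 1) * cs + max 0 ((p : Int) + 1 - left)))) := by
  obtain ⟨cn, rfl⟩ : ∃ cn : Nat, c = (cn : Int) := ⟨c.toNat, by omega⟩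
  have hleft : 0 ≤ P - PySem.Int.mod (PySem.Int.floordiv num_items (cn : Int)) P := by
    have := PySem.Int.mod_lt (PySem.Int.floordiv num_items (cn : Int)) (b := P) (by omega)
    omega
  rw [show ((cn : Int)).toNat = cn from Int.toNat_natCast cn]
  exact pv_outer (PySem.Int.floordiv num_items (cn : Int))
    (PySem.Int.floordiv (PySem.Int.floordiv num_items (cn : Int)) P)
    (P - PySem.Int.mod (PySem.Int.floordiv num_items (cn : Int)) P) P hleft cn

theorem pv_B_closed (num_items P c : Int) :
    partition_uniform_py_alt num_items P c
    = (List.range P.toNat).map (fun (p : Nat) =>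
        (List.range c.toNat).map (fun (i : Nat) =>
          let pi := PySem.Int.floordiv num_items c
          let cs := PySem.Int.floordiv pi P
          let left := P - PySem.Int.mod pi P
          ((i : Int) * pi + (p : Int) * cs + max 0 ((p : Int) - left),
           (i : Int) * pi + ((p : Int) + 1) * cs + max 0 ((p : Int) + 1 - left)))) := by
  unfold partition_uniform_py_alt
  simp only [PySem.List.pyRange_one, List.map_map]
  refine List.ext_getElem (by simp) ?_
  intro k h1 h2
  simp [Function.comp_def]

-- ===== VERDICT (by name: the statement is the Claim_ definition above) =====
theorem partition_uniform_py_spec : Claim_equal_partition_uniform_py := by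
  intro num_items P c _ hpre
  obtain ⟨hc0, hP0, hdvd, hcs, harm⟩ := hpre
  unfold Spec_partition_uniform_py
  by_cases hP : 1 ≤ P
  · by_cases hc : 1 ≤ c
    · rw [pv_A_closed num_items P c hP (by omega), pv_B_closed]
    · -- num_chunks < 0: A's chunk loop and B's inner comprehension are both empty
      unfold partition_uniform_py partition_uniform_py_alt
      rw [PySem.List.pyRange_one_eq_nil (show c ≤ 0 by omega)]
      simp
  · -- pipeline_parallel_size < 0: no parts rows on either side
    unfold partition_uniform_py partition_uniform_py_alt
    rw [PySem.List.pyRange_one_eq_nil (show P ≤ 0 by omega)]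
    simp
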